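-- pv_equiv track=rewrite | github.com/AnjaneyaTripathi/knowledge_graph | scripts/detail_extractor.py | actionTaken
-- ===== SOURCE A (Python) =====
-- def actionTaken(text):
--     actions = ['settlement', 'penalty', 'court granted', 'admitting or denying the allegations']
--     actiontaken = []
--     paragraphs = text.split('\n\n')
--     for paragraph in paragraphs:
--         sentences = paragraph.split('. ')
--         flag = False
--         for sentence in sentences:
--             if flag or any(word in sentence for word in actions):
--                 actiontaken.append(sentence.strip())
--                 flag = True
--
--     return actiontaken
-- ===== SOURCE B (Python) =====
-- def actionTaken(text):
--     actions = ['settlement', 'penalty', 'court granted', 'admitting or denying the allegations']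
--     result = []
--     for paragraph in text.split('\n\n'):
--         sentences = paragraph.split('. ')
--         result += [s.strip() for i, s in enumerate(sentences)
--                    if any(w in t for t in sentences[:i+1] for w in actions)]
--     return result
-- ===== Notes on version B (the rewrite author's own statement) =====
-- stated objective: alternative
-- what changed: Replaces A's stateful sticky-flag pass with a stateless filtered comprehension: a sentence is kept iff some sentence in its closed prefix sentences[:i+1] contains a keyword, recomputed per sentence (quadratic brute force, no carried flag).
import Mathlib
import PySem

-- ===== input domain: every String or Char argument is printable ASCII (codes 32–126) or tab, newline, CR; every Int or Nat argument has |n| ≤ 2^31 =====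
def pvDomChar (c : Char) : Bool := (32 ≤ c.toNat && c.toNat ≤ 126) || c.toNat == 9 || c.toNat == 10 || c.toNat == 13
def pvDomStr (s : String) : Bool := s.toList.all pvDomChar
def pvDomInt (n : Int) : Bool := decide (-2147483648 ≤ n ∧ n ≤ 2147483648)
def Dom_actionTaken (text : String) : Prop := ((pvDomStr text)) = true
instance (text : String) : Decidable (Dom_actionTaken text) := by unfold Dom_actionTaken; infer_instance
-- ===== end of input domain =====

-- B replaces A's sticky-flag single pass by a stateless quadratic filter (keep a sentence iff its closed prefix contains a keyword match); alternative decomposition, not faster.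

-- ===== PORT A =====
def pvActions : List String :=
  ["settlement", "penalty", "court granted", "admitting or denying the allegations"]

-- literal port of A: outer loop over paragraphs, inner loop carrying (accumulator, flag)
def actionTaken (text : String) : List String :=
  ((PySem.Str.split? text "\n\n").getD []).foldl
    (fun acc paragraph =>
      (((PySem.Str.split? paragraph ". ").getD []).foldl
        (fun (st : List String × Bool) sentence =>
          if st.2 || pvActions.any (fun word => PySem.Str.isIn word sentence) then
            (st.1 ++ [PySem.Str.strip sentence], true)
          else st)
        (acc, false)).1)
    []

-- ===== PORT B =====
-- port of B: per paragraph, a filtered comprehension over enumerate(sentences):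
-- sentence i is kept (stripped) iff some sentence of sentences[:i+1] contains a keyword
def actionTaken_alt (text : String) : List String :=
  ((PySem.Str.split? text "\n\n").getD []).foldl
    (fun result paragraph =>
      let sentences := (PySem.Str.split? paragraph ". ").getD []
      result ++
        ((PySem.List.enumerate sentences).filter
          (fun p => (PySem.List.slice sentences none (some (p.1 + 1))).any
            (fun t => pvActions.any (fun word => PySem.Str.isIn word t)))).map
          (fun p => PySem.Str.strip p.2))
    []

-- ===== PRECONDITION & SPEC =====
def Spec_actionTaken (text : String) (out : List String) : Prop := out = actionTaken_alt text
instance (text : String) (out : List String) : Decidable (Spec_actionTaken text out) := by unfold Spec_actionTaken; infer_instance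

-- ===== CLAIM =====
def Claim_equal_actionTaken : Prop := ∀ (text : String), Dom_actionTaken text → Spec_actionTaken text (actionTaken text)

-- ===== LEMMAS AND PROOFS =====

def pvMatch (s : String) : Bool := pvActions.any (fun word => PySem.Str.isIn word s)

def pvStep (st : List String × Bool) (sentence : String) : List String × Bool :=
  if st.2 || pvMatch sentence then (st.1 ++ [PySem.Str.strip sentence], true) else st

-- B's per-paragraph selection, generalized by an initial flag b
def pvBsel (ss : List String) (b : Bool) : List String :=
  ((PySem.List.enumerate ss).filter
    (fun p => b || (PySem.List.slice ss none (some (p.1 + 1))).any pvMatch)).map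
    (fun p => PySem.Str.strip p.2)

lemma enumerate_shift {α : Type} (xs : List α) (s : Int) :
    PySem.List.enumerate xs (s + 1) = (PySem.List.enumerate xs s).map (fun p => (p.1 + 1, p.2)) := by
  induction xs generalizing s with
  | nil => simp [PySem.List.enumerate_nil]
  | cons x t ih => simp [PySem.List.enumerate_cons, ih (s + 1)]

lemma pvTail_eq (x : String) (xs : List String) (b : Bool) :
    ((PySem.List.enumerate xs 0).map (fun p : Int × String => (p.1 + 1, p.2))).filter
        (fun p => b || (PySem.List.slice (x :: xs) none (some (p.1 + 1))).any pvMatch)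
      = ((PySem.List.enumerate xs 0).filter
          (fun p => (b || pvMatch x) || (PySem.List.slice xs none (some (p.1 + 1))).any pvMatch)).map
          (fun p : Int × String => (p.1 + 1, p.2)) := by
  rw [List.filter_map]
  apply congrArg
  apply List.filter_congr
  intro p hp
  obtain ⟨k, hk, rfl⟩ := (PySem.List.mem_enumerate_iff _ _ _).1 hp
  simp only [Function.comp_apply]
  have h1 : PySem.List.slice (x :: xs) none (some (((0 : Int) + k, xs[k]).1 + 1 + 1)) = x :: xs.take (k + 1) := by
    have he : ((0 : Int) + k, xs[k]).1 + 1 + 1 = ((k + 2 : Nat) : Int) := by push_cast; ring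
    rw [he, PySem.List.slice_to_natCast]
    simp [List.take_succ_cons]
  have h2 : PySem.List.slice xs none (some (((0 : Int) + k, xs[k]).1 + 1)) = xs.take (k + 1) := by
    have he : ((0 : Int) + k, xs[k]).1 + 1 = ((k + 1 : Nat) : Int) := by push_cast; ring
    rw [he, PySem.List.slice_to_natCast]
  rw [h1, h2]
  simp [List.any_cons, Bool.or_assoc]

lemma pvBsel_cons (x : String) (xs : List String) (b : Bool) :
    pvBsel (x :: xs) b
      = (if b || pvMatch x then [PySem.Str.strip x] else []) ++ pvBsel xs (b || pvMatch x) := by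
  unfold pvBsel
  rw [PySem.List.enumerate_cons, enumerate_shift xs 0, List.filter_cons]
  have h0 : (((0 : Int), x).1 + 1) = ((1 : Nat) : Int) := by norm_num
  have hhead : PySem.List.slice (x :: xs) none (some (((0 : Int), x).1 + 1)) = [x] := by
    rw [h0, PySem.List.slice_to_natCast]; simp
  rw [hhead, pvTail_eq]
  simp only [List.any_cons, List.any_nil, Bool.or_false]
  by_cases hb : (b || pvMatch x) = true
  · simp [hb, List.map_map, Function.comp]
  · simp only [Bool.not_eq_true] at hb
    simp [hb, List.map_map, Function.comp]

-- A's inner flag loop computes acc ++ B's selection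
lemma inner_eq (ss : List String) (b : Bool) (acc : List String) :
    (ss.foldl pvStep (acc, b)).1 = acc ++ pvBsel ss b := by
  induction ss generalizing b acc with
  | nil => simp [pvBsel]
  | cons s t ih =>
    rw [List.foldl_cons, pvBsel_cons]
    by_cases h : (b || pvMatch s) = true
    · have : pvStep (acc, b) s = (acc ++ [PySem.Str.strip s], true) := by simp [pvStep, h]
      rw [this, ih]
      simp [h, List.append_assoc]
    · simp only [Bool.not_eq_true] at h
      have : pvStep (acc, b) s = (acc, b) := by simp [pvStep, h]
      rw [this, ih]
      rcases Bool.or_eq_false_iff.1 h with ⟨hb, hm⟩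
      simp [hb, hm]

-- ===== VERDICT =====
theorem actionTaken_spec : Claim_equal_actionTaken := by
  intro text _
  unfold Spec_actionTaken actionTaken actionTaken_alt
  have main : ∀ (ps : List String) (acc : List String),
      ps.foldl (fun acc paragraph =>
        ((((PySem.Str.split? paragraph ". ").getD []).foldl pvStep (acc, false)).1)) acc
      = ps.foldl (fun result paragraph =>
          let sentences := (PySem.Str.split? paragraph ". ").getD []
          result ++
            ((PySem.List.enumerate sentences).filter
              (fun p => (PySem.List.slice sentences none (some (p.1 + 1))).any
                (fun t => pvActions.any (fun word => PySem.Str.isIn word t)))).map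
              (fun p => PySem.Str.strip p.2)) acc := by
    intro ps
    induction ps with
    | nil => simp
    | cons p t ih =>
      intro acc
      rw [List.foldl_cons, List.foldl_cons, inner_eq, ih]
      have : pvBsel ((PySem.Str.split? p ". ").getD []) false
          = ((PySem.List.enumerate ((PySem.Str.split? p ". ").getD [])).filter
              (fun q => (PySem.List.slice ((PySem.Str.split? p ". ").getD []) none (some (q.1 + 1))).any
                (fun t => pvActions.any (fun word => PySem.Str.isIn word t)))).map
              (fun q => PySem.Str.strip q.2) := by
        unfold pvBsel pvMatch
        simp
      rw [this]
  exact main _ []
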